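-- pv_equiv track=rewrite | github.com/jing1988a/python_fb | fb/ExclusiveTimeofFunctions1116.py | exclusiveTime
-- ===== SOURCE A (Python) =====
-- def exclusiveTime(n, logs):
--     # write your code here
--     ans = [0 for i in range(n)]
--     stack = []
--     curTime = 0
--     for temp in logs:
--         pId, action, timeStamp = temp.split(":")
--         timeStamp=int(timeStamp)
--         if action == 'start':
--             if stack:
--                 preId = stack[-1]
--                 ans[preId] += timeStamp - curTime
--             curTime = timeStamp
--             stack.append(int(pId))
--         else:
--             preId = stack.pop()
--             ans[preId] += timeStamp - curTime + 1
--             curTime = timeStamp + 1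
--     return ans
-- ===== SOURCE B (Python) =====
-- def exclusiveTime(n, logs):
--     ans = [0] * n
--     frames = []  # (id, start_timestamp, accumulated_child_time)
--     for log in logs:
--         fid, action, ts = log.split(":")
--         ts = int(ts)
--         if action == "start":
--             frames.append((int(fid), ts, 0))
--         else:
--             cid, start, child = frames.pop()
--             total = ts - start + 1
--             ans[cid] += total - child
--             if frames:
--                 pf, ps, pc = frames.pop()
--                 frames.append((pf, ps, pc + total))
--     return ans
-- ===== Notes on version B (the rewrite author's own statement) =====
-- stated objective: alternative
-- what changed: B replaces A's global curTime clock with incremental charges at every event by per-frame accounting: each stack frame carries (id, start, child_time) and the whole exclusive time of a frame is credited once, at its 'end', as (span - child_time), with the span added to the parent's child_time.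
-- outside the precondition, e.g. on exclusiveTime(2, ['0:start:0', '1:start:3']): A returns [3, 0], B returns [0, 0]; on exclusiveTime(2, ['-1:start:0', '-1:end:1']): A returns [0, 2], B returns [0, 2]
import Mathlib
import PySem

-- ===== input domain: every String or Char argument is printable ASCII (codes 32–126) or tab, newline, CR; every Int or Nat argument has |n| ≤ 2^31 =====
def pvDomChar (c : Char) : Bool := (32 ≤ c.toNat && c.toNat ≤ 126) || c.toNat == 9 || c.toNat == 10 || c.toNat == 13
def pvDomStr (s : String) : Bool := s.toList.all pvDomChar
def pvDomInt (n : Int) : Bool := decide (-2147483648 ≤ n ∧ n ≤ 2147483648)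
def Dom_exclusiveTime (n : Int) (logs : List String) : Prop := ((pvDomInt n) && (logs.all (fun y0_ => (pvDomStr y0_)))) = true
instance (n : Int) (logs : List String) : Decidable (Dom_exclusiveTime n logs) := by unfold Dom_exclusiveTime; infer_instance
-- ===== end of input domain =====

-- B replaces A's global-clock incremental charging with per-frame accounting (frames carry
-- (id, start, child_time); a frame's whole exclusive time is credited once, at its 'end');
-- same O(L) cost, different maintained state (objective: alternative).

-- ===== PORT A =====
def stepA (st : List Int × List Int × Int) (temp : String) : List Int × List Int × Int :=
  match st with
  | (ans, stack, curTime) =>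
    match PySem.Str.split? temp ":" with
    | some [pId, action, timeStamp] =>
      match PySem.Int.ofStr? timeStamp with
      | some ts =>
        if action == "start" then
          let ans' :=
            if stack ≠ [] then
              let preId := PySem.List.pyGetD stack (-1) 0
              PySem.List.pySetD ans preId (PySem.List.pyGetD ans preId 0 + (ts - curTime))
            else ans
          (ans', stack ++ [(PySem.Int.ofStr? pId).getD 0], ts)
        else
          match PySem.List.pop? stack with
          | some (preId, stack') =>
            (PySem.List.pySetD ans preId (PySem.List.pyGetD ans preId 0 + (ts - curTime + 1)), stack', ts + 1)
          | none => (ans, stack, curTime)    -- IndexError: outside Pre_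
      | none => (ans, stack, curTime)        -- ValueError: outside Pre_
    | _ => (ans, stack, curTime)             -- unpacking ValueError: outside Pre_

def exclusiveTime (n : Int) (logs : List String) : List Int :=
  (logs.foldl stepA ((PySem.List.pyRange 0 n).map (fun _ => (0 : Int)), ([] : List Int), (0 : Int))).1

-- ===== PORT B =====
def stepB (st : List Int × List (Int × Int × Int)) (temp : String) : List Int × List (Int × Int × Int) :=
  match st with
  | (ans, frames) =>
    match PySem.Str.split? temp ":" with
    | some [fid, action, tsS] =>
      match PySem.Int.ofStr? tsS with
      | some ts =>
        if action == "start" then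
          (ans, frames ++ [((PySem.Int.ofStr? fid).getD 0, ts, 0)])
        else
          match PySem.List.pop? frames with
          | some ((cid, start, child), rest) =>
            let total := ts - start + 1
            let ans' := PySem.List.pySetD ans cid (PySem.List.pyGetD ans cid 0 + (total - child))
            match PySem.List.pop? rest with
            | some ((pf, ps, pc), rest2) => (ans', rest2 ++ [(pf, ps, pc + total)])
            | none => (ans', rest)
          | none => (ans, frames)            -- IndexError: outside Pre_
      | none => (ans, frames)                -- ValueError: outside Pre_
    | _ => (ans, frames)                     -- unpacking ValueError: outside Pre_

def exclusiveTime_alt (n : Int) (logs : List String) : List Int :=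
  (logs.foldl stepB (List.replicate n.toNat (0 : Int), ([] : List (Int × Int × Int)))).1

-- ===== PRECONDITION & SPEC =====
-- Pre_ admits exactly the well-formed, fully balanced logs: every line splits as id:action:ts with
-- ts an int literal, every 'start' line's id an int in [0, n), every non-'start' line closing an
-- open frame, and no frame left open at the end.
-- It excludes two kinds of input on which A still RETURNS a value, both accidental corners of A:
-- logs leaving frames open at the end (A credits arbitrary partial time to unclosed frames, B
-- credits none — neither value is specified for truncated logs), and ids in [-n, 0) (Python's
-- negative-index wraparound, on which A and B happen to agree).
def preAux (n : Int) : Nat → List String → Bool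
  | d, [] => d == 0
  | d, l :: r =>
    match PySem.Str.split? l ":" with
    | some [p, a, t] =>
      (PySem.Int.ofStr? t).isSome &&
        (if a == "start" then
          (match PySem.Int.ofStr? p with
           | some i => decide (0 ≤ i ∧ i < n)
           | none => false) && preAux n (d + 1) r
        else
          decide (0 < d) && preAux n (d - 1) r)
    | _ => false

def Pre_exclusiveTime (n : Int) (logs : List String) : Prop := preAux n 0 logs = true
instance (n : Int) (logs : List String) : Decidable (Pre_exclusiveTime n logs) := by
  unfold Pre_exclusiveTime; infer_instance

def pvWitness_exclusiveTime : Int × List String :=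
  (2, ["0:start:0", "1:start:2", "1:end:5", "0:end:6"])

def Spec_exclusiveTime (n : Int) (logs : List String) (out : List Int) : Prop := out = exclusiveTime_alt n logs
instance (n : Int) (logs : List String) (out : List Int) : Decidable (Spec_exclusiveTime n logs out) := by
  unfold Spec_exclusiveTime; infer_instance

-- ===== CLAIM (what is proved, stated in full; the proofs are below) =====
def Claim_equal_exclusiveTime : Prop := ∀ (n : Int) (logs : List String), Dom_exclusiveTime n logs → Pre_exclusiveTime n logs → Spec_exclusiveTime n logs (exclusiveTime n logs)

-- ===== LEMMAS AND PROOFS =====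

-- pending exclusive time per id j: for the B-stack given TOP-FIRST, the top frame has been
-- charged (in A) up to `cur`, every lower frame up to the start time of the frame above it.
def psumR (j : Int) : Int → List (Int × Int × Int) → Int
  | _, [] => 0
  | cur, (i, s, c) :: r => (if i = j then cur - s - c else 0) + psumR j s r

def RelAB : (List Int × List Int × Int) → (List Int × List (Int × Int × Int)) → Prop :=
  fun sa sb =>
    sa.2.1 = sb.2.map (·.1) ∧
    (∀ f ∈ sb.2, 0 ≤ f.1 ∧ f.1 < (sb.1.length : Int)) ∧
    sa.1.length = sb.1.length ∧
    ∀ j : Nat, sa.1.getD j 0 = sb.1.getD j 0 + psumR (j : Int) sa.2.2 sb.2.reverse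

theorem getD_pySetD_int (xs : List Int) (i : Int) (v : Int) (h0 : 0 ≤ i) (hl : i < (xs.length : Int)) (j : Nat) :
    (PySem.List.pySetD xs i v).getD j 0 = if i = (j : Int) then v else xs.getD j 0 := by
  rw [PySem.List.pySetD_of_nonneg xs v h0, List.getD_eq_getElem?_getD,
    List.getD_eq_getElem?_getD, List.getElem?_set]
  by_cases h : i = (j : Int)
  · have h1 : i.toNat = j := by omega
    have h2 : i.toNat < xs.length := by omega
    simp [h, show j < xs.length by omega]
  · have h1 : i.toNat ≠ j := by omega
    simp [h1, h]

theorem pyGetD_nonneg_getD (xs : List Int) (i : Int) (h0 : 0 ≤ i) (hl : i < (xs.length : Int)) :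
    PySem.List.pyGetD xs i 0 = xs.getD i.toNat 0 := by
  rw [PySem.List.pyGetD_eq_getElem xs _ h0 hl, List.getD_eq_getElem?_getD,
    List.getElem?_eq_getElem (by omega)]
  rfl

theorem main_invariant (n : Int) : ∀ (logs : List String) (sa : List Int × List Int × Int)
    (sb : List Int × List (Int × Int × Int)),
    preAux n sa.2.1.length logs = true → RelAB sa sb → sb.1.length = n.toNat →
    RelAB (logs.foldl stepA sa) (logs.foldl stepB sb) ∧ (logs.foldl stepA sa).2.1 = [] := by
  intro logs
  induction logs with
  | nil =>
    intro sa sb hpre hrel _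
    simp only [preAux, beq_iff_eq] at hpre
    exact ⟨hrel, List.eq_nil_of_length_eq_zero hpre⟩
  | cons l r ih =>
    intro sa sb hpre hrel hlen
    obtain ⟨ansA, stA, cur⟩ := sa
    obtain ⟨ansB, stB⟩ := sb
    obtain ⟨hstack, hids, hansl, hsum⟩ := hrel
    rcases hsp : PySem.Str.split? l ":" with _ | ps
    · simp [preAux, hsp] at hpre
    rcases ps with _ | ⟨p, _ | ⟨a, _ | ⟨t, _ | ⟨x, rest⟩⟩⟩⟩
    · simp [preAux, hsp] at hpre
    · simp [preAux, hsp] at hpre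
    · simp [preAux, hsp] at hpre
    case cons.some.cons.cons.cons.nil =>
      rcases hts : PySem.Int.ofStr? t with _ | ts
      · simp [preAux, hsp, hts] at hpre
      by_cases ha : a = "start"
      · -- start line
        subst ha
        rcases hp : PySem.Int.ofStr? p with _ | i
        · simp [preAux, hsp, hts, hp] at hpre
        simp only [preAux, hsp, hts, hp, beq_self_eq_true, if_true, Bool.and_eq_true,
          Option.isSome_some, decide_eq_true_eq, true_and] at hpre
        obtain ⟨⟨hi0, hin⟩, hrec⟩ := hpre
        simp only at hstack hids hansl hsum hlen
        subst hstack
        rw [List.foldl_cons, List.foldl_cons]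
        simp only [stepA, stepB, hsp, hts, hp, beq_self_eq_true, if_true, Option.getD_some]
        rcases List.eq_nil_or_concat stB with rfl | ⟨fs, ⟨pi, ps, pc⟩, rfl⟩
        · -- A's stack is empty: no charge, both just push
          simp only [List.map_nil, ne_eq, not_true_eq_false, if_false, List.nil_append]
          apply ih
          · simpa using hrec
          · refine ⟨by simp, ?_, hansl, ?_⟩
            · intro f hf
              simp only [List.mem_singleton] at hf
              subst hf
              refine ⟨hi0, ?_⟩
              simp only [hlen]
              omega
            · intro j
              have hold := hsum j
              simp only [List.reverse_nil, List.nil_append, List.reverse_cons, psumR] at hold ⊢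
              split_ifs <;> omega
          · exact hlen
        · -- A's stack nonempty: A charges the top frame, B pushes with child_time 0
          simp only [List.concat_eq_append] at hids hsum hrec ⊢
          have hpi := hids (pi, ps, pc) (by simp)
          have hne : (fs ++ [(pi, ps, pc)]).map (fun x => x.1) ≠ [] := by simp
          simp only [ne_eq, List.map_append, List.map_cons, List.map_nil, List.append_ne_nil_of_right_ne_nil,
            List.cons_ne_self, not_false_eq_true, reduceIte,
            PySem.List.pyGetD_neg_one_append_singleton]
          apply ih
          · simpa using hrec
          · refine ⟨by simp, ?_, by simp [PySem.List.length_pySetD, hansl], ?_⟩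
            · intro f hf
              rcases List.mem_append.1 hf with hf' | hf'
              · exact hids f hf'
              · simp only [List.mem_singleton] at hf'
                subst hf'
                refine ⟨hi0, ?_⟩
                simp only [hlen]
                omega
            · intro j
              have hold := hsum j
              have hpiA : pi < ((ansA.length : Int)) := by
                rw [hansl]; exact hpi.2
              rw [getD_pySetD_int ansA pi _ hpi.1 hpiA,
                pyGetD_nonneg_getD ansA pi hpi.1 hpiA]
              simp only [List.reverse_append, List.reverse_cons, List.reverse_nil,
                List.nil_append, List.cons_append, psumR] at hold ⊢
              by_cases hc : pi = (j : Int)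
              · have hj : pi.toNat = j := by omega
                rw [hj]
                simp only [hc, if_pos] at hold ⊢
                split_ifs <;> omega
              · simp only [hc, if_false] at hold ⊢
                split_ifs <;> omega
          · simpa using hlen
      · -- end line
        have ha' : (a == "start") = false := by simp [ha]
        simp only [preAux, hsp, hts, ha', Bool.and_eq_true, Option.isSome_some, true_and,
          if_false, Bool.false_eq_true, decide_eq_true_eq] at hpre
        obtain ⟨hd, hrec⟩ := hpre
        simp only at hstack hids hansl hsum hlen
        subst hstack
        rcases List.eq_nil_or_concat stB with rfl | ⟨fs, ⟨ci, cs, cc⟩, rfl⟩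
        · simp at hd
        simp only [List.concat_eq_append] at hids hsum hrec hd ⊢
        have hci := hids (ci, cs, cc) (by simp)
        have hciA : ci < ((ansA.length : Int)) := by rw [hansl]; exact hci.2
        rw [List.foldl_cons, List.foldl_cons]
        simp only [stepA, stepB, hsp, hts, ha', List.map_append, List.map_cons, List.map_nil,
          Bool.false_eq_true, if_false]
        rw [PySem.List.pop?_last, PySem.List.pop?_last]
        rcases List.eq_nil_or_concat fs with rfl | ⟨fs2, ⟨pf, pfs, pfc⟩, rfl⟩
        · -- closing the only open frame
          dsimp only
          rw [show PySem.List.pop? ([] : List (Int × Int × Int)) = none from rfl]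
          dsimp only
          simp only [List.map_nil]
          apply ih
          · simpa using hrec
          · refine ⟨by simp, by simp, by simp [hansl], ?_⟩
            intro j
            have hold := hsum j
            rw [getD_pySetD_int ansA ci _ hci.1 hciA,
              getD_pySetD_int ansB ci _ hci.1 hci.2,
              pyGetD_nonneg_getD ansA ci hci.1 hciA,
              pyGetD_nonneg_getD ansB ci hci.1 hci.2]
            simp only [List.reverse_nil, List.nil_append, List.reverse_cons, psumR] at hold ⊢
            by_cases hc : ci = (j : Int)
            · have hj : ci.toNat = j := by omega
              rw [hj]
              simp only [hc, if_pos] at hold ⊢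
              omega
            · simp only [hc, if_false] at hold ⊢
              omega
          · simp [hlen]
        · -- closing a nested frame: its span is added to the parent's child_time
          simp only [List.concat_eq_append] at hids hsum hrec hd ⊢
          rw [PySem.List.pop?_last]
          dsimp only
          apply ih
          · simpa using hrec
          · refine ⟨by simp, ?_, by simp [hansl], ?_⟩
            · intro f hf
              simp only [PySem.List.length_pySetD]
              rcases List.mem_append.1 hf with hf' | hf'
              · exact hids f (by simp [hf'])
              · simp only [List.mem_singleton] at hf'
                subst hf'
                exact hids (pf, pfs, pfc) (by simp)
            · intro j
              have hold := hsum j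
              have hpf := hids (pf, pfs, pfc) (by simp)
              rw [getD_pySetD_int ansA ci _ hci.1 hciA,
                getD_pySetD_int ansB ci _ hci.1 hci.2,
                pyGetD_nonneg_getD ansA ci hci.1 hciA,
                pyGetD_nonneg_getD ansB ci hci.1 hci.2]
              simp only [List.reverse_append, List.reverse_cons, List.reverse_nil,
                List.nil_append, List.cons_append, psumR] at hold ⊢
              by_cases hc : ci = (j : Int)
              · have hj : ci.toNat = j := by omega
                rw [hj]
                simp only [hc, if_pos] at hold ⊢
                split_ifs at hold ⊢ <;> omega
              · simp only [hc, if_false] at hold ⊢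
                split_ifs at hold ⊢ <;> omega
          · simp [hlen]
    case cons.some.cons.cons.cons.cons => simp [preAux, hsp] at hpre
-- ===== VERDICT (by name: the statement is the Claim_ definition above) =====
theorem exclusiveTime_spec : Claim_equal_exclusiveTime := by
  unfold Claim_equal_exclusiveTime
  intro n logs _ hpre
  unfold Spec_exclusiveTime exclusiveTime exclusiveTime_alt
  have hinit : (PySem.List.pyRange 0 n).map (fun _ => (0 : Int)) = List.replicate n.toNat 0 := by
    rw [List.map_const', PySem.List.length_pyRange_one]
    norm_num
  have h := main_invariant n logs
      ((PySem.List.pyRange 0 n).map (fun _ => (0 : Int)), ([] : List Int), (0 : Int))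
      (List.replicate n.toNat 0, ([] : List (Int × Int × Int)))
      (by simpa using hpre)
      ⟨by simp, by simp, by rw [hinit], by intro j; simp [psumR, hinit]⟩
      (by simp)
  obtain ⟨⟨h1, h2, h3, h4⟩, hempty⟩ := h
  have hB : (List.foldl stepB (List.replicate n.toNat 0, ([] : List (Int × Int × Int))) logs).2 = [] := by
    rw [hempty] at h1
    exact (List.map_eq_nil_iff.mp h1.symm)
  apply List.ext_getElem h3
  intro i hi1 hi2
  have h4i := h4 i
  rw [hB] at h4i
  simp only [List.reverse_nil, psumR, add_zero] at h4i
  rw [List.getD_eq_getElem?_getD, List.getD_eq_getElem?_getD,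
    List.getElem?_eq_getElem hi1, List.getElem?_eq_getElem hi2] at h4i
  simpa using h4i
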